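-- pv_equiv track=rewrite | github.com/NishantKumar1301/Dsa-Pratice-Questions | Leetcode/Problem Of The Day/march25.py | helper
-- ===== SOURCE A (Python) =====
-- def helper(rectangles, dim):
--         cnt = 0
--         rectangles.sort(key=lambda rect: rect[dim])
--         furthest_end = rectangles[0][dim + 2]
--         for i in range(1, len(rectangles)):
--             rect = rectangles[i]
--             if furthest_end <= rect[dim]:
--                 cnt += 1
--             furthest_end = max(furthest_end, rect[dim + 2])
--         return cnt >= 2
-- ===== SOURCE B (Python) =====
-- def _merge_groups(rects, dim):
--     # Divide and conquer: compute each half's list of merged disjoint groups, then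
--     # fold the right half's groups into the left half's.
--     if len(rects) <= 1:
--         r = rects[0]
--         return [(r[dim], r[dim + 2])]
--     mid = len(rects) // 2
--     groups = _merge_groups(rects[:mid], dim)
--     for s, e in _merge_groups(rects[mid:], dim):
--         if groups[-1][1] <= s:
--             groups.append((s, e))
--         else:
--             groups[-1] = (groups[-1][0], max(groups[-1][1], e))
--     return groups
--
--
-- def helper(rectangles, dim):
--     # Same in-place sort as A; equivalence is about the return value.
--     rectangles.sort(key=lambda rect: rect[dim])
--     return len(_merge_groups(rectangles, dim)) >= 3
-- ===== Notes on version B (the rewrite author's own statement) =====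
-- stated objective: alternative
-- what changed: B replaces A's single linear sweep with a counter and running furthest end by a mergesort-style divide-and-conquer: each half of the sorted list is recursively reduced to its list of merged disjoint interval groups, the halves are combined, and B returns len(groups) >= 3.
import Mathlib
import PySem

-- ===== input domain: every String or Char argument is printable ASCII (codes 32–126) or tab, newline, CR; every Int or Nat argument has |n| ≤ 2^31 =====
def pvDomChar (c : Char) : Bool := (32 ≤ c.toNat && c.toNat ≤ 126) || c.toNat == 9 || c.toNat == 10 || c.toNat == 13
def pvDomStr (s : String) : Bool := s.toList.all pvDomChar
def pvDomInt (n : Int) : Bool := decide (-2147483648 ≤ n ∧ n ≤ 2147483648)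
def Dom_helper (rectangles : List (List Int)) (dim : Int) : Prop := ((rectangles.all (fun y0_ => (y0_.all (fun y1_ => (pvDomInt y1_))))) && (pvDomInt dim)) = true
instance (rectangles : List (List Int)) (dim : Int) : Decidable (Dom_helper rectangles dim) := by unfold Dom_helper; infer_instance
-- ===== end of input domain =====

-- B replaces A's single linear sweep (counter + running furthest end) by a mergesort-style
-- divide-and-conquer that reduces each half of the sorted list to its merged disjoint interval
-- groups and combines them, returning len(groups) >= 3 (objective: alternative, same cost).
-- Both Pythons sort `rectangles` in place; the equivalence proved here is about the return value
-- (the in-place sort is identical in A and B).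

-- ===== PORT A =====
-- rect[dim] / rect[dim+2]; total form pyGetD is used — Pre_helper carries the InRange conditions.
def pvStart (dim : Int) (rect : List Int) : Int := PySem.List.pyGetD rect dim 0
def pvEnd (dim : Int) (rect : List Int) : Int := PySem.List.pyGetD rect (dim + 2) 0

-- A's loop body: state (cnt, furthest_end)
def stepA (dim : Int) (st : Int × Int) (rect : List Int) : Int × Int :=
  (if st.2 ≤ pvStart dim rect then st.1 + 1 else st.1, max st.2 (pvEnd dim rect))

def helper (rectangles : List (List Int)) (dim : Int) : Bool :=
  match PySem.List.sorted rectangles (fun rect => pvStart dim rect) with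
  | [] => false  -- Python raises IndexError on rectangles[0]; excluded by Pre_helper
  | r0 :: rest =>
    decide (2 ≤ (rest.foldl (stepA dim) (0, pvEnd dim r0)).1)

-- ===== PORT B =====
-- B's combine loop body over a group (s, e): groups[-1] via getLastD, in-place update of
-- groups[-1] via dropLast ++ [...].
def stepPair (gs : List (Int × Int)) (p : Int × Int) : List (Int × Int) :=
  if (gs.getLastD (0, 0)).2 ≤ p.1 then gs ++ [p]
  else gs.dropLast ++ [((gs.getLastD (0, 0)).1, max (gs.getLastD (0, 0)).2 p.2)]

-- _merge_groups: divide and conquer on the (sorted) list; rects[:mid]/rects[mid:] = take/drop.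
def mergeGroups (dim : Int) (rects : List (List Int)) : List (Int × Int) :=
  match h : rects with
  | [] => []  -- Python raises IndexError on rects[0]; unreachable from a nonempty top call
  | [r] => [(pvStart dim r, pvEnd dim r)]
  | _ :: _ :: _ =>
    (mergeGroups dim (rects.drop (rects.length / 2))).foldl stepPair
      (mergeGroups dim (rects.take (rects.length / 2)))
termination_by rects.length
decreasing_by
  all_goals (subst h; simp only [List.length_drop, List.length_take, List.length_cons]; omega)

def helper_alt (rectangles : List (List Int)) (dim : Int) : Bool :=
  decide (3 ≤ (mergeGroups dim (PySem.List.sorted rectangles (fun rect => pvStart dim rect))).length)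

-- ===== PRECONDITION & SPEC =====
-- Pre_: exactly the inputs on which Python A returns: a nonempty list whose every element
-- admits the indices dim and dim+2 (Python negative indexing included); otherwise A raises IndexError.
def Pre_helper (rectangles : List (List Int)) (dim : Int) : Prop :=
  rectangles ≠ [] ∧ ∀ r ∈ rectangles,
    PySem.Raise.InRange r.length dim ∧ PySem.Raise.InRange r.length (dim + 2)
instance (rectangles : List (List Int)) (dim : Int) : Decidable (Pre_helper rectangles dim) := by
  unfold Pre_helper; infer_instance

def pvWitness_helper : List (List Int) × Int := ([[0, 9, 3], [3, 9, 5], [6, 9, 8]], 0)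

def Spec_helper (rectangles : List (List Int)) (dim : Int) (out : Bool) : Prop := out = helper_alt rectangles dim
instance (rectangles : List (List Int)) (dim : Int) (out : Bool) : Decidable (Spec_helper rectangles dim out) := by unfold Spec_helper; infer_instance

-- ===== CLAIM (what is proved, stated in full; the proofs are below) =====
def Claim_equal_helper : Prop := ∀ (rectangles : List (List Int)) (dim : Int), Dom_helper rectangles dim → Pre_helper rectangles dim → Spec_helper rectangles dim (helper rectangles dim)

-- ===== LEMMAS AND PROOFS =====

-- stepB: folding one raw rectangle = folding its span as a group of one.
def stepB (dim : Int) (gs : List (Int × Int)) (rect : List Int) : List (Int × Int) :=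
  stepPair gs (pvStart dim rect, pvEnd dim rect)

lemma stepPair_ne_nil (gs : List (Int × Int)) (p : Int × Int) : stepPair gs p ≠ [] := by
  unfold stepPair; split_ifs <;> simp

-- one-step commutation: absorbing a new span into (G combined with H) equals combining G
-- with (H absorbing the span).  Holds for every G; H must be nonempty.
lemma step_comm (G H : List (Int × Int)) (p : Int × Int) (hH : H ≠ []) :
    stepPair (H.foldl stepPair G) p = (stepPair H p).foldl stepPair G := by
  obtain ⟨H', h, rfl⟩ := (List.eq_nil_or_concat' H).resolve_left hH
  simp only [List.foldl_append, List.foldl_cons, List.foldl_nil]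
  by_cases hsplit : h.2 ≤ p.1
  · have : stepPair (H' ++ [h]) p = (H' ++ [h]) ++ [p] := by
      unfold stepPair; rw [List.getLastD_concat, if_pos hsplit]
    rw [this]
    simp [List.foldl_append]
  · have hmerge : stepPair (H' ++ [h]) p = H' ++ [(h.1, max h.2 p.2)] := by
      unfold stepPair
      rw [List.getLastD_concat, if_neg hsplit, List.dropLast_concat]
    rw [hmerge, List.foldl_append, List.foldl_cons, List.foldl_nil]
    set F := H'.foldl stepPair G with hF
    by_cases hg : (F.getLastD (0, 0)).2 ≤ h.1
    · have h1 : stepPair F h = F ++ [h] := by unfold stepPair; rw [if_pos hg]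
      have h2 : stepPair (F ++ [h]) p = F ++ [(h.1, max h.2 p.2)] := by
        unfold stepPair
        rw [List.getLastD_concat, if_neg hsplit, List.dropLast_concat]
      have h3 : stepPair F (h.1, max h.2 p.2) = F ++ [(h.1, max h.2 p.2)] := by
        unfold stepPair; rw [if_pos hg]
      rw [h1, h2, h3]
    · have h1 : stepPair F h
          = F.dropLast ++ [((F.getLastD (0, 0)).1, max (F.getLastD (0, 0)).2 h.2)] := by
        unfold stepPair; rw [if_neg hg]
      have hno : ¬ max (F.getLastD (0, 0)).2 h.2 ≤ p.1 := by
        intro hc; exact hsplit (le_trans (le_max_right ..) hc)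
      have h2 : stepPair (F.dropLast ++ [((F.getLastD (0, 0)).1, max (F.getLastD (0, 0)).2 h.2)]) p
          = F.dropLast ++ [((F.getLastD (0, 0)).1, max (max (F.getLastD (0, 0)).2 h.2) p.2)] := by
        unfold stepPair
        rw [List.getLastD_concat, if_neg hno, List.dropLast_concat]
      have h3 : stepPair F (h.1, max h.2 p.2)
          = F.dropLast ++ [((F.getLastD (0, 0)).1, max (F.getLastD (0, 0)).2 (max h.2 p.2))] := by
        unfold stepPair; rw [if_neg hg]
      rw [h1, h2, h3, max_assoc]

-- combining commutes with a whole fold of spans.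
lemma foldl_comm (ys : List (Int × Int)) :
    ∀ (G H : List (Int × Int)), H ≠ [] →
      ys.foldl stepPair (H.foldl stepPair G) = (ys.foldl stepPair H).foldl stepPair G := by
  induction ys with
  | nil => intro G H _; rfl
  | cons y ys ih =>
    intro G H hH
    simp only [List.foldl_cons]
    rw [step_comm G H y hH, ih G (stepPair H y) (stepPair_ne_nil H y)]

-- mergeGroups on a nonempty list equals the linear group sweep.
lemma mergeGroups_eq (dim : Int) :
    ∀ (n : Nat) (xs : List (List Int)), xs.length ≤ n → ∀ (r : List Int) (t : List (List Int)),
      xs = r :: t →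
      mergeGroups dim xs = t.foldl (stepB dim) [(pvStart dim r, pvEnd dim r)] := by
  intro n
  induction n with
  | zero => intro xs hxs r t hrt; subst hrt; simp at hxs
  | succ n ih =>
    intro xs hxs r t hrt
    subst hrt
    match t with
    | [] => simp [mergeGroups]
    | t0 :: ts =>
      rw [mergeGroups]
      set xs := r :: t0 :: ts with hxs'
      have hlen : 2 ≤ xs.length := by simp [hxs']
      set m := xs.length / 2 with hm
      have hm1 : 1 ≤ m := by omega
      have hmlt : m < xs.length := by omega
      have htake : xs.take m ≠ [] := by simp [List.take_eq_nil_iff]; omega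
      have hdrop : xs.drop m ≠ [] := by simp [List.drop_eq_nil_iff]; omega
      obtain ⟨a, as, ha⟩ := List.exists_cons_of_ne_nil htake
      obtain ⟨b, bs, hb⟩ := List.exists_cons_of_ne_nil hdrop
      have hta : (xs.take m).length ≤ n := by
        rw [List.length_take]; omega
      have htb : (xs.drop m).length ≤ n := by
        rw [List.length_drop]; omega
      rw [ih _ hta a as ha, ih _ htb b bs hb]
      -- fold of stepB over rects = fold of stepPair over their spans
      have hmapa : ∀ (l : List (List Int)) (init : List (Int × Int)),
          l.foldl (stepB dim) init
            = (l.map (fun r => (pvStart dim r, pvEnd dim r))).foldl stepPair init := by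
        intro l init; rw [List.foldl_map]; rfl
      rw [hmapa bs]
      rw [← foldl_comm (bs.map (fun r => (pvStart dim r, pvEnd dim r)))
            (as.foldl (stepB dim) [(pvStart dim a, pvEnd dim a)])
            [(pvStart dim b, pvEnd dim b)] (by simp)]
      have hone : List.foldl stepPair (as.foldl (stepB dim) [(pvStart dim a, pvEnd dim a)])
            [(pvStart dim b, pvEnd dim b)]
          = stepB dim (as.foldl (stepB dim) [(pvStart dim a, pvEnd dim a)]) b := rfl
      rw [hone, ← hmapa bs, ← List.foldl_cons, ← List.foldl_append]
      have happ : (a :: as) ++ (b :: bs) = xs := by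
        rw [← ha, ← hb]; exact List.take_append_drop m xs
      rw [hxs'] at happ
      have hhead : a = r := by
        have := congrArg (fun l => l.head?) happ
        simpa using this
      have htail : as ++ b :: bs = t0 :: ts := by
        have := congrArg (fun l => l.tail) happ
        simpa using this
      rw [htail, hhead]

-- Invariant relating the linear group sweep to A's (cnt, furthest_end) state.
-- M is the largest "already sealed" end: M ≤ every remaining start, and
-- A's furthest_end = max (last group's end) M.
lemma fold_invariant (dim : Int) :
    ∀ (rest : List (List Int)) (gs : List (Int × Int)) (cnt M : Int),
      gs ≠ [] →
      (∀ r ∈ rest, M ≤ pvStart dim r) →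
      rest.Pairwise (fun a b => pvStart dim a ≤ pvStart dim b) →
      ((rest.foldl (stepB dim) gs).length : Int)
        = gs.length + (rest.foldl (stepA dim) (cnt, max (gs.getLastD (0, 0)).2 M)).1 - cnt := by
  intro rest
  induction rest with
  | nil => intro gs cnt M _ _ _; simp
  | cons rect rest ih =>
    intro gs cnt M hne hM hpw
    have hMr : M ≤ pvStart dim rect := hM rect (List.mem_cons_self ..)
    have hpw' := (List.pairwise_cons.mp hpw)
    simp only [List.foldl_cons]
    by_cases h : (gs.getLastD (0, 0)).2 ≤ pvStart dim rect
    · -- new group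
      have hstepB : stepB dim gs rect = gs ++ [(pvStart dim rect, pvEnd dim rect)] := by
        simp only [stepB, stepPair]; rw [if_pos h]
      have hcond : max (gs.getLastD (0, 0)).2 M ≤ pvStart dim rect := max_le h hMr
      have hstepA : stepA dim (cnt, max (gs.getLastD (0, 0)).2 M) rect
          = (cnt + 1, max (max (gs.getLastD (0, 0)).2 M) (pvEnd dim rect)) := by
        simp only [stepA]; rw [if_pos hcond]
      rw [hstepB, hstepA]
      have key := ih (gs ++ [(pvStart dim rect, pvEnd dim rect)]) (cnt + 1)
        (max (gs.getLastD (0, 0)).2 M)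
        (by simp)
        (fun r hr => le_trans hcond (hpw'.1 r hr))
        hpw'.2
      rw [List.getLastD_concat] at key
      rw [max_comm (pvEnd dim rect) (max (gs.getLastD (0, 0)).2 M)] at key
      simp only [List.length_append, List.length_singleton] at key
      omega
    · -- merge into the last group
      have hstepB : stepB dim gs rect
          = gs.dropLast ++ [((gs.getLastD (0, 0)).1, max (gs.getLastD (0, 0)).2 (pvEnd dim rect))] := by
        simp only [stepB, stepPair]; rw [if_neg h]
      have hcond : ¬ max (gs.getLastD (0, 0)).2 M ≤ pvStart dim rect := by
        intro hc; exact h (le_trans (le_max_left ..) hc)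
      have hstepA : stepA dim (cnt, max (gs.getLastD (0, 0)).2 M) rect
          = (cnt, max (max (gs.getLastD (0, 0)).2 M) (pvEnd dim rect)) := by
        simp only [stepA]; rw [if_neg hcond]
      rw [hstepB, hstepA]
      have key := ih (gs.dropLast ++ [((gs.getLastD (0, 0)).1, max (gs.getLastD (0, 0)).2 (pvEnd dim rect))])
        cnt M (by simp) (fun r hr => hM r (List.mem_cons_of_mem _ hr)) hpw'.2
      rw [List.getLastD_concat] at key
      have hmax : max (max (gs.getLastD (0, 0)).2 (pvEnd dim rect)) M
          = max (max (gs.getLastD (0, 0)).2 M) (pvEnd dim rect) := by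
        rw [max_assoc, max_comm (pvEnd dim rect) M, ← max_assoc]
      rw [hmax] at key
      have hpos : 0 < gs.length := List.length_pos_of_ne_nil hne
      simp only [List.length_append, List.length_singleton, List.length_dropLast] at key
      omega

-- ===== VERDICT (by name: the statement is the Claim_ definition above) =====
theorem helper_spec : Claim_equal_helper := by
  intro rectangles dim _ _
  unfold Spec_helper helper helper_alt
  cases hs : PySem.List.sorted rectangles (fun rect => pvStart dim rect) with
  | nil => simp [mergeGroups]
  | cons r0 rest =>
    have hpw : (r0 :: rest).Pairwise (fun a b => pvStart dim a ≤ pvStart dim b) := by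
      rw [← hs]; exact PySem.List.sorted_pairwise rectangles (fun rect => pvStart dim rect)
    have hpw' := List.pairwise_cons.mp hpw
    rw [mergeGroups_eq dim (r0 :: rest).length (r0 :: rest) le_rfl r0 rest rfl]
    have key := fold_invariant dim rest [(pvStart dim r0, pvEnd dim r0)] 0
      (min (pvEnd dim r0) (pvStart dim r0))
      (by simp)
      (fun r hr => le_trans (min_le_right ..) (hpw'.1 r hr))
      hpw'.2
    have hl : ([(pvStart dim r0, pvEnd dim r0)] : List (Int × Int)).getLastD (0, 0)
        = (pvStart dim r0, pvEnd dim r0) := rfl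
    rw [hl, max_eq_left (min_le_left ..)] at key
    show decide (2 ≤ (List.foldl (stepA dim) (0, pvEnd dim r0) rest).1)
        = decide (3 ≤ (List.foldl (stepB dim) [(pvStart dim r0, pvEnd dim r0)] rest).length)
    simp only [decide_eq_decide]
    simp only [List.length_singleton] at key
    omega
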